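-- pv_equiv track=rewrite | github.com/HollandPleskac/Clonr-AI-Characters | scrapers/scrape-cleaners/scrape_final.py | remove_empty_markdown
-- ===== SOURCE A (Python) =====
-- def remove_empty_markdown(s, depth=0):
--     changes = False
--     new: list[str] = []
--     for line in s.split("\n"):
--         if line.startswith("#") and new and new[-1].startswith("#"):
--             new.pop()
--             changes = True
--         new.append(line)
--     s = "\n".join(new)
--     if changes and depth < 8:
--         return remove_empty_markdown(s, depth=depth + 1)
--     return s
-- ===== SOURCE B (Python) =====
-- def remove_empty_markdown(s, depth=0):
--     lines = s.split("\n")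
--     kept = [cur for cur, nxt in zip(lines, lines[1:])
--             if not (cur.startswith("#") and nxt.startswith("#"))]
--     kept.append(lines[-1])
--     return "\n".join(kept)
-- ===== Notes on version B (the rewrite author's own statement) =====
-- stated objective: simpler
-- what changed: Replaced the pop-the-previous accumulator loop plus up-to-8-deep fixpoint recursion by a single non-recursive lookahead pass (zip each line with its successor, drop a header whose successor is also a header, always keep the last line); one pass already reaches the fixpoint, so the recursion is provably redundant.
import Mathlib
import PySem

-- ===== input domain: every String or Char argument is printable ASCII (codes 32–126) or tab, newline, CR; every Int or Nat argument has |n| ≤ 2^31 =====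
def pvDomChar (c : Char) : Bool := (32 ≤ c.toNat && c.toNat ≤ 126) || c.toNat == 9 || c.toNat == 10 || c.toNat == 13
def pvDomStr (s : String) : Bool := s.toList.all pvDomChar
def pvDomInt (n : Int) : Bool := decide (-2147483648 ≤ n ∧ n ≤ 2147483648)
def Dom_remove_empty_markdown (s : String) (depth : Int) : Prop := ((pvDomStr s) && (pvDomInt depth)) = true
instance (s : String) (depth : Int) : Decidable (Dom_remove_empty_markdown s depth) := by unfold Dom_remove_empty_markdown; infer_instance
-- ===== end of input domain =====

-- B replaces A's pop-the-previous accumulator loop and fixpoint recursion by one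
-- non-recursive lookahead pass (one pass already reaches the fixpoint); objective: simpler.

-- ===== PORT A =====
-- one fold step of A's loop: state = (changes, new)
def remA_step (st : Bool × List (List Char)) (line : List Char) : Bool × List (List Char) :=
  if PySem.Chars.startswith line ['#'] && !st.2.isEmpty
      && PySem.Chars.startswith (PySem.List.pyGetD st.2 (-1) []) ['#'] then
    (true, st.2.dropLast ++ [line])
  else
    (st.1, st.2 ++ [line])

-- A's body over List Char; recursion on depth exactly as in the Python (depth < 8 guard)
def remA (cs : List Char) (depth : Int) : List Char :=
  let r := (PySem.Chars.splitOn cs ['\n']).foldl remA_step (false, [])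
  let s' := PySem.Chars.join ['\n'] r.2
  if r.1 && decide (depth < 8) then remA s' (depth + 1) else s'
termination_by (8 - depth).toNat
decreasing_by
  rename_i h
  simp only [Bool.and_eq_true, decide_eq_true_eq] at h
  omega

def remove_empty_markdown (s : String) (depth : Int) : String :=
  String.ofList (remA s.toList depth)

-- ===== PORT B =====
def remove_empty_markdown_alt (s : String) (depth : Int) : String :=
  let lines := PySem.Chars.splitOn s.toList ['\n']
  let kept := ((lines.zip lines.tail).filter
      (fun p => !(PySem.Chars.startswith p.1 ['#'] && PySem.Chars.startswith p.2 ['#']))).map (·.1)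
  String.ofList (PySem.Chars.join ['\n'] (kept ++ [PySem.List.pyGetD lines (-1) []]))

-- ===== PRECONDITION & SPEC =====
def Spec_remove_empty_markdown (s : String) (depth : Int) (out : String) : Prop := out = remove_empty_markdown_alt s depth
instance (s : String) (depth : Int) (out : String) : Decidable (Spec_remove_empty_markdown s depth out) := by unfold Spec_remove_empty_markdown; infer_instance

-- ===== CLAIM (what is proved, stated in full; the proofs are below) =====
def Claim_equal_remove_empty_markdown : Prop := ∀ (s : String) (depth : Int), Dom_remove_empty_markdown s depth → Spec_remove_empty_markdown s depth (remove_empty_markdown s depth)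

-- ===== LEMMAS AND PROOFS =====

-- abbreviation for "line is a header"
def isH (l : List Char) : Bool := PySem.Chars.startswith l ['#']

-- the collapse of one run-keeping pass, stated structurally (proof-side reference function)
def gKeep : List (List Char) → List (List Char)
  | [] => []
  | [x] => [x]
  | x :: y :: t => if isH x && isH y then gKeep (y :: t) else x :: gKeep (y :: t)

-- simple structural characterisation of splitOn on the single separator '\n'
def mySplit : List Char → List (List Char)
  | [] => [[]]
  | c :: cs =>
    if c = '\n' then [] :: mySplit cs
    else (c :: (mySplit cs).headI) :: (mySplit cs).tail

lemma mySplit_ne_nil (cs : List Char) : mySplit cs ≠ [] := by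
  cases cs <;> simp [mySplit] <;> (try split) <;> simp

lemma go_step (fuel : Nat) (c : Char) (rest cur : List Char) (acc : List (List Char)) :
    PySem.Chars.splitOn.go ['\n'] (fuel+1) (c :: rest) cur acc =
      if c = '\n' then PySem.Chars.splitOn.go ['\n'] fuel rest [] (cur.reverse :: acc)
      else PySem.Chars.splitOn.go ['\n'] fuel rest (c :: cur) acc := by
  rw [PySem.Chars.splitOn.go]
  by_cases h : c = '\n' <;> simp [List.isPrefixOf, h]
  exact fun heq => absurd heq.symm h

lemma go_nil (fuel : Nat) (cur : List Char) (acc : List (List Char)) :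
    PySem.Chars.splitOn.go ['\n'] (fuel+1) [] cur acc = (cur.reverse :: acc).reverse := by
  rw [PySem.Chars.splitOn.go]; simp

lemma go_spec (l : List Char) : ∀ (fuel : Nat) (cur : List Char) (acc : List (List Char)),
    l.length < fuel →
    PySem.Chars.splitOn.go ['\n'] fuel l cur acc
      = acc.reverse ++ (cur.reverse ++ (mySplit l).headI) :: (mySplit l).tail := by
  induction l with
  | nil =>
    intro fuel cur acc h
    cases fuel with
    | zero => omega
    | succ f => simp [go_nil, mySplit]
  | cons c rest ih =>
    intro fuel cur acc h
    cases fuel with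
    | zero => omega
    | succ f =>
      rw [go_step]
      by_cases hc : c = '\n'
      · rw [if_pos hc, ih f [] (cur.reverse :: acc) (by simpa using h)]
        cases hm : mySplit rest with
        | nil => exact absurd hm (mySplit_ne_nil rest)
        | cons a t => simp [mySplit, hc, hm]
      · rw [if_neg hc, ih f (c :: cur) acc (by simpa using h)]
        have := mySplit_ne_nil rest
        simp [mySplit, hc]

lemma splitOn_eq_mySplit (cs : List Char) :
    PySem.Chars.splitOn cs ['\n'] = mySplit cs := by
  have h := go_spec cs (cs.length + 1) [] [] (by omega)
  have := mySplit_ne_nil cs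
  unfold PySem.Chars.splitOn
  rw [h]
  cases hm : mySplit cs with
  | nil => exact absurd hm this
  | cons a t => simp

-- mySplit never produces a piece containing '\n'
lemma mySplit_newline_free (cs : List Char) : ∀ l ∈ mySplit cs, '\n' ∉ l := by
  induction cs with
  | nil => simp [mySplit]
  | cons c rest ih =>
    by_cases hc : c = '\n'
    · simpa [mySplit, hc] using ih
    · intro l hl
      have hne := mySplit_ne_nil rest
      cases hm : mySplit rest with
      | nil => exact absurd hm hne
      | cons a t =>
        rw [mySplit, if_neg hc, hm] at hl
        simp only [List.headI, List.tail_cons, List.mem_cons] at hl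
        rcases hl with rfl | hl
        · have ha : a ∈ mySplit rest := by rw [hm]; exact List.mem_cons_self
          have hna := ih a ha
          simp only [List.mem_cons, not_or]
          exact ⟨fun hh => hc hh.symm, hna⟩
        · exact ih l (by rw [hm]; exact List.mem_cons_of_mem _ hl)

-- splitOn is a left inverse of join on nonempty lists of newline-free pieces
lemma mySplit_append (l cs : List Char) (hfree : '\n' ∉ l) :
    mySplit (l ++ '\n' :: cs) = l :: mySplit cs := by
  induction l with
  | nil => simp [mySplit]
  | cons c t ih =>
    have hc : c ≠ '\n' := by intro h; exact hfree (by simp [h])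
    have ht : '\n' ∉ t := fun h => hfree (List.mem_cons_of_mem _ h)
    simp [mySplit, hc, ih ht]

lemma mySplit_single (l : List Char) (hfree : '\n' ∉ l) : mySplit l = [l] := by
  induction l with
  | nil => simp [mySplit]
  | cons c t ih =>
    have hc : c ≠ '\n' := by intro h; exact hfree (by simp [h])
    have ht : '\n' ∉ t := fun h => hfree (List.mem_cons_of_mem _ h)
    simp [mySplit, hc, ih ht]

lemma mySplit_join (ls : List (List Char)) (hne : ls ≠ [])
    (hfree : ∀ l ∈ ls, '\n' ∉ l) :
    mySplit (PySem.Chars.join ['\n'] ls) = ls := by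
  induction ls with
  | nil => exact absurd rfl hne
  | cons l t ih =>
    cases t with
    | nil =>
      have hj : PySem.Chars.join ['\n'] [l] = l := by
        simp [PySem.Chars.join, List.intercalate]
      rw [hj]
      exact mySplit_single l (hfree l (by simp))
    | cons m u =>
      have hjoin : PySem.Chars.join ['\n'] (l :: m :: u)
          = l ++ '\n' :: PySem.Chars.join ['\n'] (m :: u) := by
        simp [PySem.Chars.join, List.intercalate, List.intersperse]
      rw [hjoin, mySplit_append l _ (hfree l (by simp)), ih (by simp)
        (fun x hx => hfree x (List.mem_cons_of_mem _ hx))]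

-- A's fold computes gKeep
lemma foldA_spec (xs : List (List Char)) :
    ∀ (b : Bool) (acc : List (List Char)) (l : List Char),
    ((xs.foldl remA_step (b, acc ++ [l])).2) = acc ++ gKeep (l :: xs) := by
  induction xs with
  | nil => intro b acc l; simp [gKeep]
  | cons x t ih =>
    intro b acc l
    by_cases hc : isH x && isH l
    · have : l :: x :: t = l :: x :: t := rfl
      simp only [List.foldl_cons, remA_step]
      have hcond : (PySem.Chars.startswith x ['#'] && !(acc ++ [l]).isEmpty
          && PySem.Chars.startswith (PySem.List.pyGetD (acc ++ [l]) (-1) []) ['#']) = true := by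
        rw [PySem.List.pyGetD_neg_one_append_singleton]
        simp only [isH, Bool.and_eq_true] at hc
        simp [hc.1, hc.2]
      rw [if_pos hcond]
      have hdl : (acc ++ [l]).dropLast = acc := by simp
      rw [hdl, ih true acc x]
      simp only [gKeep, Bool.and_comm] at hc ⊢
      rw [if_pos hc]
    · simp only [List.foldl_cons, remA_step]
      have hcond : (PySem.Chars.startswith x ['#'] && !(acc ++ [l]).isEmpty
          && PySem.Chars.startswith (PySem.List.pyGetD (acc ++ [l]) (-1) []) ['#']) = false := by
        rw [PySem.List.pyGetD_neg_one_append_singleton]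
        simp only [isH, Bool.and_eq_true, not_and] at hc ⊢
        by_cases h1 : PySem.Chars.startswith x ['#'] = true <;> simp_all
      rw [hcond]
      simp only [Bool.false_eq_true, if_false]
      have : acc ++ [l] ++ [x] = (acc ++ [l]) ++ [x] := rfl
      rw [this, ih b (acc ++ [l]) x]
      simp only [gKeep, Bool.and_comm] at hc ⊢
      rw [if_neg hc]
      simp

lemma foldA_full (x : List Char) (xs : List (List Char)) :
    (((x :: xs).foldl remA_step (false, [])).2) = gKeep (x :: xs) := by
  simp only [List.foldl_cons, remA_step]
  have hcond : (PySem.Chars.startswith x ['#'] && !(([] : List (List Char))).isEmpty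
      && PySem.Chars.startswith (PySem.List.pyGetD ([] : List (List Char)) (-1) []) ['#']) = false := by
    simp
  rw [hcond]
  simp only [Bool.false_eq_true, if_false]
  simpa using foldA_spec xs false [] x

-- gKeep output has no adjacent header pair; gKeep is the identity on such lists
def noAdj : List (List Char) → Prop
  | [] => True
  | [_] => True
  | x :: y :: t => ¬(isH x = true ∧ isH y = true) ∧ noAdj (y :: t)

lemma gKeep_head (y : List Char) (t : List (List Char)) (hy : isH y = false) :
    ∃ r, gKeep (y :: t) = y :: r := by
  cases t with
  | nil => exact ⟨[], rfl⟩
  | cons m u => simp [gKeep, hy]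

lemma gKeep_noAdj (ls : List (List Char)) : noAdj (gKeep ls) := by
  induction ls with
  | nil => trivial
  | cons x t ih =>
    cases t with
    | nil => trivial
    | cons y u =>
      by_cases hc : (isH x && isH y) = true
      · simpa [gKeep, hc] using ih
      · rw [gKeep, if_neg (by simp [hc])]
        by_cases hx : isH x = true
        · have hy : isH y = false := by
            cases h : isH y
            · rfl
            · exact absurd (by simp [hx, h]) hc
          obtain ⟨r, hr⟩ := gKeep_head y u hy
          rw [hr]
          rw [hr] at ih
          exact ⟨fun hh => by simp [hy] at hh, ih⟩
        · cases hg : gKeep (y :: u) with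
          | nil => trivial
          | cons a r =>
            rw [hg] at ih
            exact ⟨fun hh => hx hh.1, ih⟩

lemma gKeep_fixed (ls : List (List Char)) (h : noAdj ls) : gKeep ls = ls := by
  induction ls with
  | nil => rfl
  | cons x t ih =>
    cases t with
    | nil => rfl
    | cons y u =>
      obtain ⟨h1, h2⟩ := h
      have hc : (isH x && isH y) = false := by
        by_cases hx : isH x = true <;> by_cases hy : isH y = true <;> simp_all
      rw [gKeep, hc]
      simp only [Bool.false_eq_true, if_false]
      rw [ih h2]

lemma gKeep_idem (ls : List (List Char)) : gKeep (gKeep ls) = gKeep ls :=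
  gKeep_fixed _ (gKeep_noAdj ls)

lemma gKeep_ne_nil (x : List Char) (xs : List (List Char)) : gKeep (x :: xs) ≠ [] := by
  induction xs generalizing x with
  | nil => simp [gKeep]
  | cons y u ih =>
    rw [gKeep]
    split
    · exact ih y
    · simp

lemma gKeep_subset (ls : List (List Char)) : ∀ l ∈ gKeep ls, l ∈ ls := by
  induction ls with
  | nil => simp [gKeep]
  | cons x t ih =>
    cases t with
    | nil => simp [gKeep]
    | cons y u =>
      intro l hl
      rw [gKeep] at hl
      split at hl
      · exact List.mem_cons_of_mem _ (ih l hl)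
      · rcases List.mem_cons.mp hl with rfl | hl
        · exact List.mem_cons_self
        · exact List.mem_cons_of_mem _ (ih l hl)

-- B's zip-filter lookahead pass computes gKeep
lemma zipKeep_spec (ls : List (List Char)) (h : ls ≠ []) :
    ((ls.zip ls.tail).filter
        (fun p => !(PySem.Chars.startswith p.1 ['#'] && PySem.Chars.startswith p.2 ['#']))).map (·.1)
      ++ [PySem.List.pyGetD ls (-1) []] = gKeep ls := by
  induction ls with
  | nil => exact absurd rfl h
  | cons x t ih =>
    cases t with
    | nil =>
      rw [PySem.List.pyGetD_neg_one _ _ (by simp)]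
      simp [gKeep]
    | cons y u =>
      have hlast : PySem.List.pyGetD (x :: y :: u) (-1) ([] : List Char)
          = PySem.List.pyGetD (y :: u) (-1) [] := by
        rw [PySem.List.pyGetD_neg_one _ _ (by simp), PySem.List.pyGetD_neg_one _ _ (by simp)]
        simp [List.getLast]
      have ihs := ih (by simp)
      simp only [List.tail_cons] at ihs
      simp only [List.tail_cons, List.zip_cons_cons, List.filter_cons]
      by_cases hc : (PySem.Chars.startswith x ['#'] && PySem.Chars.startswith y ['#']) = true
      · rw [hc]
        simp only [Bool.not_true, Bool.false_eq_true, if_false]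
        rw [hlast, ihs]
        rw [gKeep, if_pos (by simp only [isH]; exact hc)]
      · rw [Bool.not_eq_true] at hc
        rw [hc]
        simp only [Bool.not_false, if_true, List.map_cons, List.cons_append]
        rw [hlast, ihs]
        rw [gKeep, if_neg (by simp only [isH]; simp [hc])]

-- one closed form for A, by induction on the recursion depth
lemma remA_eq (n : Nat) : ∀ (cs : List Char) (depth : Int), n = (8 - depth).toNat →
    remA cs depth = PySem.Chars.join ['\n'] (gKeep (mySplit cs)) := by
  induction n using Nat.strong_induction_on with
  | _ n ih =>
    intro cs depth hn
    rw [remA.eq_def]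
    simp only []
    have hsplit := splitOn_eq_mySplit cs
    cases hm : mySplit cs with
    | nil => exact absurd hm (mySplit_ne_nil cs)
    | cons x xs =>
      have hfold : ((PySem.Chars.splitOn cs ['\n']).foldl remA_step (false, [])).2
          = gKeep (mySplit cs) := by
        rw [hsplit, hm]; exact foldA_full x xs
      simp only [hfold]
      split
      · next hrec =>
        simp only [Bool.and_eq_true, decide_eq_true_eq] at hrec
        have hdepth : depth < 8 := hrec.2
        have hfree : ∀ l ∈ gKeep (mySplit cs), '\n' ∉ l :=
          fun l hl => mySplit_newline_free cs l (gKeep_subset _ l hl)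
        have hgne : gKeep (mySplit cs) ≠ [] := by rw [hm]; exact gKeep_ne_nil x xs
        rw [ih ((8 - (depth+1)).toNat) (by omega) _ (depth+1) rfl]
        rw [mySplit_join _ hgne hfree, gKeep_idem, hm]
      · rw [hm]

-- ===== VERDICT (by name: the statement is the Claim_ definition above) =====
theorem remove_empty_markdown_spec : Claim_equal_remove_empty_markdown := by
  intro s depth _
  unfold Spec_remove_empty_markdown remove_empty_markdown remove_empty_markdown_alt
  rw [remA_eq ((8 - depth).toNat) s.toList depth rfl]
  rw [splitOn_eq_mySplit]
  congr 1
  rw [← zipKeep_spec (mySplit s.toList) (mySplit_ne_nil _)]
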